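-- pv_equiv track=rewrite | github.com/slflmm/ScientificAbstracts | porter_stemmer.py | patternize
-- ===== SOURCE A (Python) =====
-- def patternize(word, sequenced):
--     '''
--     Translate word to its [C]VCVC...[V] pattern.
--     C = consonant sequence
--     V = vowel sequence
--     The letter 'y' is treated as a vowel if preceded by
--     a consonant, otherwise 'y' is a consonant.
--     '''
--     pattern = []
--     for char in word:
--         letter_type = ''
--         if char in 'aeiou':
--             letter_type = 'v'
--         elif char == 'y':
--             letter_type = 'c' if (pattern and pattern[-1] == 'v') else 'v'
--         else:
--             letter_type = 'c'
--         if not pattern or not sequenced or letter_type != pattern[-1]: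
--             pattern.append(letter_type)
--
--     return ''.join(pattern)
-- ===== SOURCE B (Python) =====
-- from itertools import groupby
--
-- def patternize(word, sequenced):
--     # Pass 1: classify each character, carrying the previous type for the 'y' rule.
--     types = []
--     prev = None
--     for char in word:
--         if char in 'aeiou':
--             t = 'v'
--         elif char == 'y':
--             t = 'c' if prev == 'v' else 'v'
--         else:
--             t = 'c'
--         types.append(t)
--         prev = t
--     # Pass 2: collapse runs only when sequenced.
--     if sequenced:
--         return ''.join(k for k, _ in groupby(types))
--     return ''.join(types)
-- ===== Notes on version B (the rewrite author's own statement) =====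
-- stated objective: alternative
-- what changed: A's single fused loop that classifies each letter and conditionally appends (dedup via pattern[-1]) is split into two separate passes: a classification pass carrying a prev-type variable for the y rule, then an independent run-collapsing pass (itertools.groupby) applied only when sequenced.
import Mathlib
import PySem

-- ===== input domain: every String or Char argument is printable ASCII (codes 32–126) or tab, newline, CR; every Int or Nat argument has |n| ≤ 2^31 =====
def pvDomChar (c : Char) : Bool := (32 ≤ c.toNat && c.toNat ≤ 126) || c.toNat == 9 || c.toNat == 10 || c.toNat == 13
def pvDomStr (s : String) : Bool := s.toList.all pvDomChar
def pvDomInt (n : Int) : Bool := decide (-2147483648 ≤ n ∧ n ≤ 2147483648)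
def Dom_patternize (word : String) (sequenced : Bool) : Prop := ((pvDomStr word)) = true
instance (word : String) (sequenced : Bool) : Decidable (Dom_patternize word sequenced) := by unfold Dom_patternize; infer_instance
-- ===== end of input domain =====

-- B splits A's fused classify-and-dedup loop into a classification pass (carrying the previous
-- type for the 'y' rule) followed by a separate run-collapsing pass; same cost, different structure.

-- ===== PORT A =====
-- one loop iteration of A: classify char using pattern[-1], conditionally append
def patternizeStep (sequenced : Bool) (pattern : List Char) (char : Char) : List Char :=
  let letterType : Char :=
    if "aeiou".toList.contains char then 'v'
    else if char = 'y' then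
      (if pattern ≠ [] ∧ pattern.getLast? = some 'v' then 'c' else 'v')
    else 'c'
  if pattern = [] ∨ sequenced = false ∨ some letterType ≠ pattern.getLast? then
    pattern ++ [letterType]
  else pattern

def patternize (word : String) (sequenced : Bool) : String :=
  String.mk (word.toList.foldl (patternizeStep sequenced) [])

-- ===== PORT B =====
-- pass 1: classify each char into 'c'/'v', carrying the previous type for the 'y' rule
def classifyB : Option Char → List Char → List Char
  | _, [] => []
  | prev, c :: rest =>
    let t : Char :=
      if "aeiou".toList.contains c then 'v'
      else if c = 'y' then (if prev = some 'v' then 'c' else 'v')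
      else 'c'
    t :: classifyB (some t) rest

-- pass 2: groupby-style collapse of consecutive equal types
def collapseB : Option Char → List Char → List Char
  | _, [] => []
  | prev, t :: rest => if some t = prev then collapseB prev rest else t :: collapseB (some t) rest

def patternize_alt (word : String) (sequenced : Bool) : String :=
  let types := classifyB none word.toList
  String.mk (if sequenced then collapseB none types else types)

-- ===== PRECONDITION & SPEC =====
def Spec_patternize (word : String) (sequenced : Bool) (out : String) : Prop := out = patternize_alt word sequenced
instance (word : String) (sequenced : Bool) (out : String) : Decidable (Spec_patternize word sequenced out) := by unfold Spec_patternize; infer_instance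

-- ===== CLAIM (what is proved, stated in full; the proofs are below) =====
def Claim_equal_patternize : Prop := ∀ (word : String) (sequenced : Bool), Dom_patternize word sequenced → Spec_patternize word sequenced (patternize word sequenced)

-- ===== LEMMAS AND PROOFS =====

-- invariant: from a non-empty accumulator whose last element is p, A's loop appends exactly
-- B's classification of the rest (collapsed when sequenced)
theorem foldl_step_inv (s : Bool) (chars : List Char) :
    ∀ (acc : List Char) (p : Char), acc.getLast? = some p →
      chars.foldl (patternizeStep s) acc =
        acc ++ (if s then collapseB (some p) (classifyB (some p) chars)
                else classifyB (some p) chars) := by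
  induction chars with
  | nil => intro acc p hp; cases s <;> simp [classifyB, collapseB]
  | cons c rest ih =>
    intro acc p hp
    have hne : acc ≠ [] := by intro h; simp [h] at hp
    have hlt :
        (if "aeiou".toList.contains c then 'v'
          else if c = 'y' then (if acc ≠ [] ∧ acc.getLast? = some 'v' then 'c' else 'v')
          else 'c')
        =
        (if "aeiou".toList.contains c then 'v'
          else if c = 'y' then (if (some p : Option Char) = some 'v' then 'c' else 'v')
          else 'c') := by
      by_cases hy : c = 'y'
      · simp [hy, hne, hp]
      · simp [hy]
    set t : Char :=
      (if "aeiou".toList.contains c then 'v'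
        else if c = 'y' then (if (some p : Option Char) = some 'v' then 'c' else 'v')
        else 'c') with ht
    have hcls : classifyB (some p) (c :: rest) = t :: classifyB (some t) rest := by
      simp [classifyB, ht]
    cases s with
    | false =>
      have hstep : patternizeStep false acc c = acc ++ [t] := by
        simp only [patternizeStep]
        rw [hlt]
        simp
      have hlast : (acc ++ [t]).getLast? = some t := by simp
      simp only [List.foldl_cons, hstep]
      rw [ih (acc ++ [t]) t hlast]
      simp [hcls]
    | true =>
      by_cases heq : t = p
      · have hstep : patternizeStep true acc c = acc := by
          simp only [patternizeStep]
          rw [hlt, heq]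
          simp [hne, hp]
        simp only [List.foldl_cons, hstep]
        rw [ih acc p hp]
        simp [hcls, heq, collapseB]
      · have hstep : patternizeStep true acc c = acc ++ [t] := by
          have hne' : some t ≠ acc.getLast? := by simp [hp, heq]
          simp only [patternizeStep]
          rw [hlt]
          simp [hne']
        have hlast : (acc ++ [t]).getLast? = some t := by simp
        simp only [List.foldl_cons, hstep]
        rw [ih (acc ++ [t]) t hlast]
        have : some t ≠ some p := by simp [heq]
        simp [hcls, collapseB, this]

theorem patternize_eq_alt (word : String) (sequenced : Bool) :
    patternize word sequenced = patternize_alt word sequenced := by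
  unfold patternize patternize_alt
  cases hw : word.toList with
  | nil => simp [classifyB]; cases sequenced <;> simp [collapseB]
  | cons c rest =>
    have hlt :
        (if "aeiou".toList.contains c then 'v'
          else if c = 'y' then (if ([] : List Char) ≠ [] ∧ ([] : List Char).getLast? = some 'v' then 'c' else 'v')
          else 'c')
        =
        (if "aeiou".toList.contains c then 'v'
          else if c = 'y' then (if (none : Option Char) = some 'v' then 'c' else 'v')
          else 'c') := by
      by_cases hv : "aeiou".toList.contains c <;> by_cases hy : c = 'y' <;> simp [hv, hy]
    set t : Char :=
      (if "aeiou".toList.contains c then 'v'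
        else if c = 'y' then (if (none : Option Char) = some 'v' then 'c' else 'v')
        else 'c') with ht
    have hstep : patternizeStep sequenced [] c = [t] := by
      simp only [patternizeStep]
      rw [hlt]
      simp
    have hcls : classifyB none (c :: rest) = t :: classifyB (some t) rest := by
      simp [classifyB, ht]
    simp only [List.foldl_cons, hstep]
    rw [foldl_step_inv sequenced rest [t] t (by simp)]
    cases sequenced with
    | false => simp [hcls]
    | true => simp [hcls, collapseB]

-- ===== VERDICT (by name: the statement is the Claim_ definition above) =====
theorem patternize_spec : Claim_equal_patternize := by
  intro word sequenced _
  unfold Spec_patternize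
  exact patternize_eq_alt word sequenced
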